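-- pv_equiv track=rewrite | github.com/alsrua7222/BOJ_Algorithm_Study | Solved/9177/9177.py | IsAble
-- ===== SOURCE A (Python) =====
-- from collections import defaultdict
--
-- def IsAble(target, list1, list2):
--     # 길이가 같아야 한다.
--     if len(target) != len(list1) + len(list2):
--         return False
--
--     # 타겟에 새로운 문자가 있거나 더 많거나 더 적으면 안된다.
--     target_dict = defaultdict(int)
--     for v in target:
--         target_dict[v] += 1
--     for v in list1:
--         if v in target_dict and target_dict[v] > 0:
--             target_dict[v] -= 1
--         else:
--             return False
--     for v in list2:
--         if v in target_dict and target_dict[v] > 0: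
--             target_dict[v] -= 1
--         else:
--             return False
--
--     # 이상이 없다면 참 반환.
--     return True
-- ===== SOURCE B (Python) =====
-- def IsAble(target, list1, list2):
--     # multiset equality via sort-and-compare
--     return sorted(target) == sorted(list1 + list2)
-- ===== Notes on version B (the rewrite author's own statement) =====
-- stated objective: simpler
-- what changed: Replaced the length check plus count-table build and two early-return decrement loops with a one-line sort-and-compare multiset-equality check.
import Mathlib
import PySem

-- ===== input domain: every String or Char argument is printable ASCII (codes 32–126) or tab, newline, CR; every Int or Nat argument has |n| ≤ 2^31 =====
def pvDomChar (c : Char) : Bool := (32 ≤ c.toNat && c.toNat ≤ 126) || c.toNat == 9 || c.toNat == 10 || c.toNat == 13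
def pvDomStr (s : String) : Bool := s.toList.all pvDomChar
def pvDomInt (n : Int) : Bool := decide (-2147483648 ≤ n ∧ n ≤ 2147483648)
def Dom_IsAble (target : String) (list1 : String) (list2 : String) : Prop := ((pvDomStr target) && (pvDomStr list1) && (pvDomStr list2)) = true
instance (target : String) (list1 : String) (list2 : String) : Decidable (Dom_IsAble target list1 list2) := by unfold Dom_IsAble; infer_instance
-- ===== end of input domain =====

-- B replaces A's count-table build plus two consuming loops with one sort-and-compare
-- multiset-equality check (objective: simpler).

-- ===== PORT A =====
-- the 'for v in listX: if v in target_dict and target_dict[v] > 0: target_dict[v] -= 1 else: return False' loop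
def pvConsume (l : List Char) (d : PySem.Dict Char Int) : Option (PySem.Dict Char Int) :=
  match l with
  | [] => some d
  | v :: vs =>
    if d.contains v && decide (d.getD v 0 > 0) then
      pvConsume vs (d.modify v 0 (· - 1))
    else
      none

def IsAble (target : String) (list1 : String) (list2 : String) : Bool :=
  if PySem.Str.len target ≠ PySem.Str.len list1 + PySem.Str.len list2 then
    false
  else
    -- target_dict = defaultdict(int); for v in target: target_dict[v] += 1 (built inline)
    match pvConsume list1.toList
        (target.toList.foldl (fun d v => d.modify v 0 (· + 1)) PySem.Dict.empty) with
    | none => false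
    | some d1 =>
      match pvConsume list2.toList d1 with
      | none => false
      | some _ => true

-- ===== PORT B =====
def IsAble_alt (target : String) (list1 : String) (list2 : String) : Bool :=
  decide (PySem.List.sorted target.toList (fun x => x) false
    = PySem.List.sorted (list1.toList ++ list2.toList) (fun x => x) false)

-- ===== PRECONDITION & SPEC =====
def Spec_IsAble (target : String) (list1 : String) (list2 : String) (out : Bool) : Prop := out = IsAble_alt target list1 list2
instance (target : String) (list1 : String) (list2 : String) (out : Bool) : Decidable (Spec_IsAble target list1 list2 out) := by unfold Spec_IsAble; infer_instance

-- ===== CLAIM (what is proved, stated in full; the proofs are below) =====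
def Claim_equal_IsAble : Prop := ∀ (target : String) (list1 : String) (list2 : String), Dom_IsAble target list1 list2 → Spec_IsAble target list1 list2 (IsAble target list1 list2)

-- ===== LEMMAS AND PROOFS =====

-- the consuming loop succeeds when the counts in l fit under d
theorem pvConsume_isSome_of_le (l : List Char) (d : PySem.Dict Char Int)
    (h : ∀ v, (l.count v : Int) ≤ d.getD v 0) : (pvConsume l d).isSome = true := by
  induction l generalizing d with
  | nil => rfl
  | cons x xs ih =>
    have hx : 0 < d.getD x 0 := by
      have := h x
      rw [List.count_cons_self] at this
      push_cast at this; omega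
    have hcx : d.contains x = true := by
      by_contra hc
      rw [PySem.Dict.getD_of_not_contains d 0 (by simpa using hc)] at hx
      omega
    simp only [pvConsume]
    rw [if_pos (by simp [hcx, hx])]
    apply ih
    intro v
    rw [PySem.Dict.getD_modify]
    by_cases hv : v = x
    · subst hv
      have := h v
      rw [List.count_cons_self] at this
      push_cast at this ⊢; omega
    · rw [if_neg hv]
      have := h v
      rw [List.count_cons_of_ne (fun he => hv he.symm)] at this
      exact this

-- conversely, if d holds only nonnegative counts, success means the counts fit
theorem pvConsume_le_of_isSome (l : List Char) (d : PySem.Dict Char Int)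
    (h0 : ∀ v, 0 ≤ d.getD v 0) (h : (pvConsume l d).isSome = true) :
    ∀ v, (l.count v : Int) ≤ d.getD v 0 := by
  induction l generalizing d with
  | nil => intro v; simpa using h0 v
  | cons x xs ih =>
    simp only [pvConsume] at h
    by_cases hc : (d.contains x && decide (d.getD x 0 > 0)) = true
    · rw [if_pos hc] at h
      have hx : 0 < d.getD x 0 := by
        simp only [Bool.and_eq_true, decide_eq_true_eq] at hc
        exact hc.2
      have h0' : ∀ v, 0 ≤ (d.modify x 0 (· - 1)).getD v 0 := by
        intro v
        rw [PySem.Dict.getD_modify]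
        by_cases hv : v = x
        · subst hv; rw [if_pos rfl]; omega
        · rw [if_neg hv]; exact h0 v
      have := ih _ h0' h
      intro v
      have hv' := this v
      rw [PySem.Dict.getD_modify] at hv'
      by_cases hv : v = x
      · subst hv
        rw [if_pos rfl] at hv'
        rw [List.count_cons_self]
        push_cast at hv' ⊢; omega
      · rw [if_neg hv] at hv'
        rw [List.count_cons_of_ne (fun he => hv he.symm)]
        exact hv'
    · rw [if_neg hc] at h
      simp at h

-- a successful consumption subtracts the counts
theorem pvConsume_getD (l : List Char) (d d' : PySem.Dict Char Int)
    (h : pvConsume l d = some d') : ∀ v, d'.getD v 0 = d.getD v 0 - l.count v := by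
  induction l generalizing d with
  | nil => simp [pvConsume] at h; subst h; simp
  | cons x xs ih =>
    simp only [pvConsume] at h
    split at h
    · intro v
      have := ih _ h v
      rw [PySem.Dict.getD_modify] at this
      by_cases hv : v = x
      · subst hv
        rw [if_pos rfl] at this
        rw [this, List.count_cons_self]; push_cast; ring
      · rw [if_neg hv] at this
        rw [this, List.count_cons_of_ne (fun he => hv he.symm)]
    · exact absurd h (by simp)

-- the count table built from target answers target's counts
theorem pvTargetDict_getD (target : List Char) (v : Char) :
    (target.foldl (fun d v => d.modify v 0 (· + 1)) (PySem.Dict.empty : PySem.Dict Char Int)).getD v 0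
      = (target.count v : Int) := by
  simpa using PySem.Dict.getD_foldl_modify_add_one target PySem.Dict.empty v

-- A returns true exactly when list1 ++ list2 is a permutation of target
theorem isAble_eq_true_iff (target list1 list2 : String) :
    IsAble target list1 list2 = true ↔
      (list1.toList ++ list2.toList).Perm target.toList := by
  unfold IsAble
  by_cases hlen : PySem.Str.len target ≠ PySem.Str.len list1 + PySem.Str.len list2
  · rw [if_pos hlen]
    simp only [Bool.false_eq_true, false_iff]
    intro hp
    have hl := hp.length_eq
    simp only [List.length_append] at hl
    simp only [PySem.Str.len_eq] at hlen
    omega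
  · rw [if_neg hlen]
    have hlen' : target.toList.length = list1.toList.length + list2.toList.length := by
      simp only [PySem.Str.len_eq] at hlen; omega
    have h0 : ∀ v, (0:Int) ≤ (target.toList.foldl (fun d v => d.modify v 0 (· + 1)) PySem.Dict.empty).getD v 0 := by
      intro v; rw [pvTargetDict_getD]; positivity
    constructor
    · intro h
      rcases h1 : pvConsume list1.toList (target.toList.foldl (fun d v => d.modify v 0 (· + 1)) PySem.Dict.empty) with _ | d1
      · rw [h1] at h; simp at h
      rw [h1] at h
      dsimp only at h
      rcases h2 : pvConsume list2.toList d1 with _ | d2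
      · rw [h2] at h; simp at h
      have hcnt1 := pvConsume_le_of_isSome _ _ h0 (by rw [h1]; rfl)
      have hd1 := pvConsume_getD _ _ _ h1
      have h01 : ∀ v, (0:Int) ≤ d1.getD v 0 := by
        intro v; rw [hd1 v, pvTargetDict_getD]
        have := hcnt1 v; rw [pvTargetDict_getD] at this; omega
      have hcnt2 := pvConsume_le_of_isSome _ _ h01 (by rw [h2]; rfl)
      have hcnt : ∀ v, (list1.toList ++ list2.toList).count v ≤ target.toList.count v := by
        intro v
        have ha := hcnt2 v
        rw [hd1 v, pvTargetDict_getD] at ha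
        rw [List.count_append]
        omega
      have hle : ((list1.toList ++ list2.toList : List Char) : Multiset Char) ≤ (target.toList : Multiset Char) := by
        rw [Multiset.le_iff_count]
        intro v
        simpa using hcnt v
      have heq := Multiset.eq_of_le_of_card_le hle (by simpa using hlen'.le)
      exact Multiset.coe_eq_coe.mp heq
    · intro hp
      have hcnt : ∀ v, ((list1.toList ++ list2.toList).count v : Int) ≤ target.toList.count v := by
        intro v; rw [hp.count_eq v]
      have h1s := pvConsume_isSome_of_le list1.toList
          (target.toList.foldl (fun d v => d.modify v 0 (· + 1)) PySem.Dict.empty) (by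
        intro v
        rw [pvTargetDict_getD]
        have := hcnt v
        rw [List.count_append] at this
        push_cast at this ⊢; omega)
      rcases h1 : pvConsume list1.toList (target.toList.foldl (fun d v => d.modify v 0 (· + 1)) PySem.Dict.empty) with _ | d1
      · rw [h1] at h1s; simp at h1s
      have hd1 := pvConsume_getD _ _ _ h1
      have h2s := pvConsume_isSome_of_le list2.toList d1 (by
        intro v
        rw [hd1 v, pvTargetDict_getD]
        have := hcnt v
        rw [List.count_append] at this
        push_cast at this ⊢; omega)
      rcases h2 : pvConsume list2.toList d1 with _ | d2
      · rw [h2] at h2s; simp at h2s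
      change (match pvConsume list2.toList d1 with | none => false | some _ => true) = true
      rw [h2]

-- ===== VERDICT (by name: the statement is the Claim_ definition above) =====
theorem IsAble_spec : Claim_equal_IsAble := by
  intro target list1 list2 _
  unfold Spec_IsAble IsAble_alt
  rw [Bool.eq_iff_iff]
  rw [isAble_eq_true_iff, decide_eq_true_iff, PySem.List.sorted_id_eq_sorted_id_iff_perm]
  exact ⟨fun h => h.symm, fun h => h.symm⟩
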